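-- pv_equiv track=rewrite | github.com/max-49/usaco | feb/spellnew.py | search
-- ===== SOURCE A (Python) =====
-- def search(word, permutation):
--     for letter in word:
--         for block in permutation:
--             if letter in block:
--                 permutation.remove(block)
--                 break
--         else:
--             return False
--     return True
-- ===== SOURCE B (Python) =====
-- def search(word, permutation):
--     # Build, once, the list of block indices containing each letter (in order),
--     # then consume blocks via a removed-flag array with a per-letter advancing
--     # pointer: O(m + n*k) instead of rescanning the block list per letter.
--     idx = {}
--     for i, block in enumerate(permutation):
--         for ch in dict.fromkeys(block):
--             idx.setdefault(ch, []).append(i)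
--     removed = [False] * len(permutation)
--     ptr = {}
--     for ch in word:
--         lst = idx.get(ch, [])
--         p = ptr.get(ch, 0)
--         while p < len(lst) and removed[lst[p]]:
--             p += 1
--         ptr[ch] = p
--         if p == len(lst):
--             return False
--         removed[lst[p]] = True
--     return True
-- ===== Notes on version B (the rewrite author's own statement) =====
-- stated objective: faster
-- what changed: Instead of rescanning the live block list for every letter (and doing a substring test per block), B precomputes once a per-letter list of block indices and consumes blocks through a removed-flag array with a per-letter advancing pointer, so each letter is served by pointer advances that are globally amortized.
import Mathlib
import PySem

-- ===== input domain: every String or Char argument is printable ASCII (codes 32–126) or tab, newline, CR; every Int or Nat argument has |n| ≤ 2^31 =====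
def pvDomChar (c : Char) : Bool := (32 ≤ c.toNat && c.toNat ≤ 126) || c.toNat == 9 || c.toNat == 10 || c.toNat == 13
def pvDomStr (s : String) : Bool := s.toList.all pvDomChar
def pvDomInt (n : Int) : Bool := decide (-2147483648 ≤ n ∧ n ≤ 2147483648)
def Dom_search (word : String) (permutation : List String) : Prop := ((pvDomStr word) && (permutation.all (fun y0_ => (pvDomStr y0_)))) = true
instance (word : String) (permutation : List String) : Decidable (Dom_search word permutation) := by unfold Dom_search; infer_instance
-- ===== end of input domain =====

-- B replaces A's per-letter rescans of the block list by a precomputed per-letter index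
-- with removed flags and advancing pointers (objective: faster). A mutates `permutation`
-- in place (removes used blocks) and B does not; the equivalence is about the return value only.

-- ===== PORT A =====
-- inner `for block in permutation: if letter in block: … break / else:` — first block
-- containing the letter (`letter in block` on a 1-char needle is exactly char membership)
def searchFind (c : Char) (perm : List String) : Option String :=
  match perm with
  | [] => none
  | b :: rest => if b.toList.contains c then some b else searchFind c rest

-- outer loop over the word; `permutation.remove(block)` removes the first element equal
-- to `block`, which List.erase does exactly (the found block is always present)
def searchGo (cs : List Char) (perm : List String) : Bool :=
  match cs with
  | [] => true
  | c :: rest =>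
    match searchFind c perm with
    | none => false
    | some b => searchGo rest (perm.erase b)

def search (word : String) (permutation : List String) : Bool :=
  searchGo word.toList permutation

-- ===== PORT B =====
-- `for i, block in enumerate(permutation): for ch in dict.fromkeys(block): idx.setdefault(ch, []).append(i)`
-- (enumerate indices are the Nat counter i; setdefault-then-append = insert of getD ++ [i])
def altBuild (blocks : List String) (i : Nat) (d : PySem.Dict Char (List Nat)) :
    PySem.Dict Char (List Nat) :=
  match blocks with
  | [] => d
  | b :: rest =>
      altBuild rest (i + 1)
        ((PySem.Set.ofList b.toList).foldl (fun d ch => d.insert ch (d.getD ch [] ++ [i])) d)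

-- `while p < len(lst) and removed[lst[p]]: p += 1` (indices stored in lst are in range,
-- so getD with default 0/false is exactly the Python indexing)
def altAdvance (lst : List Nat) (removed : List Bool) (p : Nat) : Nat :=
  if h : p < lst.length then
    if removed.getD (lst.getD p 0) false then altAdvance lst removed (p + 1) else p
  else p
termination_by lst.length - p
decreasing_by omega

-- `for ch in word: …` with the removed-flag array and the pointer dict
def altGo (cs : List Char) (idx : PySem.Dict Char (List Nat)) (removed : List Bool)
    (ptr : PySem.Dict Char Nat) : Bool :=
  match cs with
  | [] => true
  | c :: rest =>
    let lst := idx.getD c []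
    let p := altAdvance lst removed (ptr.getD c 0)
    if p = lst.length then false
    else altGo rest idx (removed.set (lst.getD p 0) true) (ptr.insert c p)

def search_alt (word : String) (permutation : List String) : Bool :=
  altGo word.toList (altBuild permutation 0 PySem.Dict.empty)
    (List.replicate permutation.length false) PySem.Dict.empty

-- ===== PRECONDITION & SPEC =====
def Spec_search (word : String) (permutation : List String) (out : Bool) : Prop := out = search_alt word permutation
instance (word : String) (permutation : List String) (out : Bool) : Decidable (Spec_search word permutation out) := by unfold Spec_search; infer_instance

-- ===== CLAIM (what is proved, stated in full; the proofs are below) =====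
def Claim_equal_search : Prop := ∀ (word : String) (permutation : List String), Dom_search word permutation → Spec_search word permutation (search word permutation)

-- ===== LEMMAS AND PROOFS =====

-- the blocks still unused under the flag array R, in order (A's current `permutation`)
def pvLive (blocks : List String) (R : List Bool) : List String :=
  ((List.range blocks.length).filter (fun i => !R.getD i false)).map (fun i => blocks.getD i "")

-- reference value of idx[c]: indices (offset by i) of the blocks containing c, in order
def pvIdxList (blocks : List String) (i : Nat) (c : Char) : List Nat :=
  match blocks with
  | [] => []
  | b :: rest => (if b.toList.contains c then [i] else []) ++ pvIdxList rest (i + 1) c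

lemma pvFoldl_insert_append (S : List Char) (hS : S.Nodup) (d : PySem.Dict Char (List Nat))
    (i : Nat) (c : Char) :
    (S.foldl (fun d ch => d.insert ch (d.getD ch [] ++ [i])) d).getD c []
      = d.getD c [] ++ (if c ∈ S then [i] else []) := by
  induction S generalizing d with
  | nil => simp
  | cons ch S' ih =>
    simp only [List.nodup_cons] at hS
    rw [List.foldl_cons, ih hS.2, PySem.Dict.getD_insert]
    by_cases hc : c = ch
    · subst hc
      simp [hS.1]
    · simp [hc, List.mem_cons]

lemma pvAltBuild_getD (blocks : List String) (i : Nat) (d : PySem.Dict Char (List Nat)) (c : Char) :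
    (altBuild blocks i d).getD c [] = d.getD c [] ++ pvIdxList blocks i c := by
  induction blocks generalizing i d with
  | nil => simp [altBuild, pvIdxList]
  | cons b rest ih =>
    rw [altBuild, ih, pvIdxList,
      pvFoldl_insert_append _ (PySem.Set.nodup_ofList _) _ i c]
    by_cases hc : b.toList.contains c
    · simp [PySem.Set.mem_ofList, List.contains_iff_mem.mp hc]
    · have : c ∉ b.toList := fun h => hc (List.contains_iff_mem.mpr h)
      simp [PySem.Set.mem_ofList, this]

lemma pvIdxList_eq_filter (blocks : List String) (i : Nat) (c : Char) :
    pvIdxList blocks i c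
      = ((List.range blocks.length).filter (fun j => (blocks.getD j "").toList.contains c)).map (· + i) := by
  induction blocks generalizing i with
  | nil => simp [pvIdxList]
  | cons b rest ih =>
    rw [pvIdxList, ih, List.length_cons, List.range_succ_eq_map, List.filter_cons]
    have h2 : List.filter (fun j => ((b :: rest).getD j "").toList.contains c)
          (List.map Nat.succ (List.range rest.length))
        = List.map Nat.succ
            (List.filter (fun j => (rest.getD j "").toList.contains c) (List.range rest.length)) := by
      rw [List.filter_map]
      simp only [Function.comp_def, List.getD_cons_succ]
    have harith : List.map (fun x => x + (i + 1))
          (List.filter (fun j => (rest.getD j "").toList.contains c) (List.range rest.length))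
        = List.map (fun x => x + i) (List.map Nat.succ
            (List.filter (fun j => (rest.getD j "").toList.contains c) (List.range rest.length))) := by
      rw [List.map_map]
      apply List.map_congr_left
      intro j _
      simp [Function.comp]
      omega
    by_cases hb : b.toList.contains c
    · simp only [List.getD_cons_zero, hb, if_pos, List.map_cons, harith, h2]
      simp
    · have hm : c ∉ b.toList := fun h => hb (List.contains_iff_mem.mpr h)
      simp only [List.getD_cons_zero, hb, harith, h2]
      simp

lemma pvFind?_filter {α : Type} (L : List α) (p q : α → Bool) :
    (L.filter p).find? q = L.find? (fun x => q x && p x) := by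
  induction L with
  | nil => simp
  | cons x L ih =>
    by_cases hp : p x <;> by_cases hq : q x <;>
      simp [hp, hq, ih]

lemma pvSearchFind_live (blocks : List String) (R : List Bool) (c : Char) (L : List Nat) :
    searchFind c ((L.filter (fun i => !R.getD i false)).map (fun i => blocks.getD i ""))
      = (L.find? (fun i => !R.getD i false && (blocks.getD i "").toList.contains c)).map
          (fun i => blocks.getD i "") := by
  induction L with
  | nil => simp [searchFind]
  | cons x L ih =>
    rw [List.filter_cons, List.find?_cons]
    by_cases hx : R.getD x false <;> by_cases hc : c ∈ (blocks.getD x "").toList <;>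
      [skip; skip; skip; skip] <;>
      (simp only [List.getD] at hx hc ih ⊢; simp [hx, hc, searchFind, ih])

lemma pvGetD_set (R : List Bool) (j i : Nat) (b : Bool) :
    (R.set j b).getD i false = if i = j ∧ j < R.length then b else R.getD i false := by
  simp only [List.getD, List.getElem?_set]
  split_ifs with h1 <;> simp_all

lemma pvErase_live (blocks : List String) (R : List Bool) (c : Char) (L : List Nat) (j : Nat)
    (hL : L.Nodup) (hj : j < R.length)
    (hF : L.find? (fun i => !R.getD i false && (blocks.getD i "").toList.contains c) = some j) :
    ((L.filter (fun i => !R.getD i false)).map (fun i => blocks.getD i "")).erase (blocks.getD j "")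
      = (L.filter (fun i => !(R.set j true).getD i false)).map (fun i => blocks.getD i "") := by
  induction L with
  | nil => simp at hF
  | cons x L ih =>
    have hnd := List.nodup_cons.mp hL
    rw [List.find?_cons] at hF
    by_cases hpx : (!R.getD x false && (blocks.getD x "").toList.contains c) = true
    · rw [hpx] at hF
      simp only [Option.some.injEq] at hF
      subst hF
      have hlive : R.getD x false = false := by
        simp only [Bool.and_eq_true, Bool.not_eq_true'] at hpx
        exact hpx.1
      have hx' : (R.set x true).getD x false = true := by
        rw [pvGetD_set]; simp [hj]
      rw [List.filter_cons, List.filter_cons, hlive, hx']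
      simp only [Bool.not_false, Bool.not_true, if_pos, if_neg, Bool.false_eq_true,
        not_false_eq_true, List.map_cons, List.erase_cons_head]
      apply congrArg
      apply List.filter_congr
      intro i hi
      have : i ≠ x := fun h => hnd.1 (h ▸ hi)
      rw [pvGetD_set]
      simp [this]
    · rw [Bool.not_eq_true] at hpx
      rw [hpx] at hF
      have hjL : j ∈ L := List.mem_of_find?_eq_some hF
      have hxj : x ≠ j := fun h => hnd.1 (h ▸ hjL)
      have hpj := List.find?_some hF
      simp only [Bool.and_eq_true, Bool.not_eq_true'] at hpj
      have hcj : c ∈ (blocks.getD j "").toList := by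
        simpa using hpj.2
      have hset : (R.set j true).getD x false = R.getD x false := by
        rw [pvGetD_set]; simp [hxj]
      by_cases hlx : R.getD x false
      · rw [List.filter_cons, List.filter_cons, hlx, hset, hlx]
        simp only [Bool.not_true, if_neg, Bool.false_eq_true, not_false_eq_true]
        exact ih hnd.2 hF
      · rw [Bool.not_eq_true] at hlx
        rw [List.filter_cons, List.filter_cons, hlx, hset, hlx]
        simp only [Bool.not_false, if_pos, List.map_cons]
        have hcx : c ∉ (blocks.getD x "").toList := by
          intro hmem
          rcases Bool.and_eq_false_iff.mp hpx with h | h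
          · rw [Bool.not_eq_false'] at h
            rw [hlx] at h
            exact Bool.noConfusion h
          · have hcon := List.contains_iff_mem.mpr hmem
            rw [h] at hcon
            exact Bool.noConfusion hcon
        have hne : blocks.getD x "" ≠ blocks.getD j "" := fun h => hcx (h ▸ hcj)
        rw [List.erase_cons_tail (by simpa using hne)]
        rw [ih hnd.2 hF]

lemma pvAltAdvance_spec (lst : List Nat) (R : List Bool) (p : Nat) (hp : p ≤ lst.length) :
    p ≤ altAdvance lst R p ∧ altAdvance lst R p ≤ lst.length ∧
      (∀ r, p ≤ r → r < altAdvance lst R p → R.getD (lst.getD r 0) false = true) ∧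
      (altAdvance lst R p < lst.length → R.getD (lst.getD (altAdvance lst R p) 0) false = false) := by
  fun_induction altAdvance lst R p with
  | case1 p h hrem ih =>
    have := ih (by omega)
    refine ⟨by omega, this.2.1, ?_, this.2.2.2⟩
    intro r hr1 hr2
    rcases Nat.eq_or_lt_of_le hr1 with h' | h'
    · rw [← h']; exact hrem
    · exact this.2.2.1 r h' hr2
  | case2 p h hrem =>
    refine ⟨le_refl _, le_of_lt h, ?_, fun _ => by simpa using hrem⟩
    intro r hr1 hr2; omega
  | case3 p h =>
    exact ⟨le_refl _, hp, fun r hr1 hr2 => by omega, fun hlt => absurd hlt h⟩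

lemma pvFind?_none (lst : List Nat) (R : List Bool)
    (h : ∀ r, r < lst.length → R.getD (lst.getD r 0) false = true) :
    lst.find? (fun i => !R.getD i false) = none := by
  induction lst with
  | nil => simp
  | cons x l ih =>
    rw [List.find?_cons]
    have h0 := h 0 (by simp)
    simp only [List.getD_cons_zero] at h0
    rw [h0]
    simp only [Bool.not_true]
    exact ih (fun r hr => by
      have := h (r + 1) (by simpa using Nat.succ_lt_succ hr)
      simpa using this)

lemma pvFind?_at (lst : List Nat) (R : List Bool) (q : Nat) (hq : q < lst.length)
    (hbefore : ∀ r, r < q → R.getD (lst.getD r 0) false = true)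
    (hlive : R.getD (lst.getD q 0) false = false) :
    lst.find? (fun i => !R.getD i false) = some (lst.getD q 0) := by
  induction lst generalizing q with
  | nil => simp at hq
  | cons x l ih =>
    rw [List.find?_cons]
    cases q with
    | zero =>
      simp only [List.getD_cons_zero] at hlive ⊢
      rw [hlive]
      simp
    | succ q' =>
      have h0 := hbefore 0 (Nat.succ_pos _)
      simp only [List.getD_cons_zero] at h0
      rw [h0]
      simp only [Bool.not_true, List.getD_cons_succ]
      exact ih q' (by simpa using hq)
        (fun r hr => by
          have := hbefore (r + 1) (Nat.succ_lt_succ hr)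
          simpa using this)
        (by simpa using hlive)

lemma pvMain (blocks : List String) (cs : List Char) (R : List Bool) (ptr : PySem.Dict Char Nat)
    (hR : R.length = blocks.length)
    (hP : ∀ c : Char, ptr.getD c 0 ≤ (pvIdxList blocks 0 c).length ∧
          ∀ r, r < ptr.getD c 0 → R.getD ((pvIdxList blocks 0 c).getD r 0) false = true) :
    searchGo cs (pvLive blocks R) = altGo cs (altBuild blocks 0 PySem.Dict.empty) R ptr := by
  induction cs generalizing R ptr with
  | nil => simp [searchGo, altGo]
  | cons c rest ih =>
    have hIdx : (altBuild blocks 0 PySem.Dict.empty).getD c [] = pvIdxList blocks 0 c := by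
      rw [pvAltBuild_getD]
      simp [PySem.Dict.getD_empty]
    obtain ⟨hPle, hPrem⟩ := hP c
    obtain ⟨hq1, hq2, hq3, hq4⟩ := pvAltAdvance_spec (pvIdxList blocks 0 c) R (ptr.getD c 0) hPle
    have hbefore : ∀ r, r < altAdvance (pvIdxList blocks 0 c) R (ptr.getD c 0) →
        R.getD ((pvIdxList blocks 0 c).getD r 0) false = true := by
      intro r hr
      by_cases h : r < ptr.getD c 0
      · exact hPrem r h
      · exact hq3 r (by omega) hr
    have hfilter : pvIdxList blocks 0 c
        = (List.range blocks.length).filter (fun j => (blocks.getD j "").toList.contains c) := by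
      rw [pvIdxList_eq_filter]; simp
    have hfind : (List.range blocks.length).find?
          (fun i => !R.getD i false && (blocks.getD i "").toList.contains c)
        = (pvIdxList blocks 0 c).find? (fun i => !R.getD i false) := by
      rw [hfilter, pvFind?_filter]
    have hA := pvSearchFind_live blocks R c (List.range blocks.length)
    simp only [searchGo, altGo, hIdx, pvLive]
    rw [hA, hfind]
    by_cases hqlen : altAdvance (pvIdxList blocks 0 c) R (ptr.getD c 0) = (pvIdxList blocks 0 c).length
    · rw [pvFind?_none (pvIdxList blocks 0 c) R (fun r hr => hbefore r (by omega))]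
      simp [hqlen]
    · have hqlt : altAdvance (pvIdxList blocks 0 c) R (ptr.getD c 0) < (pvIdxList blocks 0 c).length :=
        lt_of_le_of_ne hq2 hqlen
      have hjlive := hq4 hqlt
      have hsome : (pvIdxList blocks 0 c).find? (fun i => !R.getD i false)
          = some ((pvIdxList blocks 0 c).getD (altAdvance (pvIdxList blocks 0 c) R (ptr.getD c 0)) 0) :=
        pvFind?_at _ R _ hqlt hbefore hjlive
      set q := altAdvance (pvIdxList blocks 0 c) R (ptr.getD c 0) with hqdef
      set j := (pvIdxList blocks 0 c).getD q 0 with hjdef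
      have hjmem : j ∈ pvIdxList blocks 0 c := by
        rw [hjdef, List.getD_eq_getElem _ _ hqlt]
        exact List.getElem_mem hqlt
      have hjn : j < blocks.length := by
        rw [hfilter] at hjmem
        have := (List.mem_filter.mp hjmem).1
        simpa using this
      have hjR : j < R.length := by omega
      rw [hsome]
      simp only [Option.map_some, if_neg hqlen]
      have hErase := pvErase_live blocks R c (List.range blocks.length) j List.nodup_range hjR
        (by rw [hfind, hsome])
      rw [hErase]
      have hpres : ∀ i, R.getD i false = true → (R.set j true).getD i false = true := by
        intro i hi
        rw [pvGetD_set]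
        split_ifs
        · rfl
        · exact hi
      have hR' : (R.set j true).length = blocks.length := by simp [hR]
      have hP' : ∀ c' : Char, (ptr.insert c q).getD c' 0 ≤ (pvIdxList blocks 0 c').length ∧
          ∀ r, r < (ptr.insert c q).getD c' 0 →
            (R.set j true).getD ((pvIdxList blocks 0 c').getD r 0) false = true := by
        intro c'
        by_cases hc' : c' = c
        · subst hc'
          rw [PySem.Dict.getD_insert_self]
          exact ⟨le_of_lt hqlt, fun r hr => hpres _ (hbefore r hr)⟩
        · rw [PySem.Dict.getD_insert, if_neg hc']
          obtain ⟨h1, h2⟩ := hP c'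
          exact ⟨h1, fun r hr => hpres _ (h2 r hr)⟩
      exact ih (R.set j true) (ptr.insert c q) hR' hP' 

-- ===== VERDICT (by name: the statement is the Claim_ definition above) =====
lemma pvLive_replicate (blocks : List String) :
    pvLive blocks (List.replicate blocks.length false) = blocks := by
  unfold pvLive
  have hf : (List.range blocks.length).filter
        (fun i => !(List.replicate blocks.length false).getD i false) = List.range blocks.length := by
    apply List.filter_eq_self.mpr
    intro i _
    simp only [List.getD, List.getElem?_replicate]
    split_ifs <;> simp
  rw [hf]
  apply List.ext_getElem
  · simp
  · intro i h1 h2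
    simp [List.getD, List.getElem?_eq_getElem h2]

theorem search_spec : Claim_equal_search := by
  intro word permutation _
  unfold Spec_search search search_alt
  have h0 : ∀ c : Char, (PySem.Dict.empty : PySem.Dict Char Nat).getD c 0 ≤ (pvIdxList permutation 0 c).length ∧
      ∀ r, r < (PySem.Dict.empty : PySem.Dict Char Nat).getD c 0 →
        (List.replicate permutation.length false).getD ((pvIdxList permutation 0 c).getD r 0) false = true := by
    intro c
    constructor
    · simp [PySem.Dict.getD_empty]
    · intro r hr
      rw [PySem.Dict.getD_empty] at hr
      omega
  have h := pvMain permutation word.toList (List.replicate permutation.length false)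
    PySem.Dict.empty (by simp) h0
  rw [pvLive_replicate] at h
  exact h
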